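-- pv_equiv track=rewrite | github.com/Pippala1898/learningforplanning | current_plan_with_heuristics.py | obs_rel
-- ===== SOURCE A (Python) =====
-- def obs_rel(sg, ob_names):
--     '''
--     find the relationships of each objects
--     each object has only one up
--     '''
--     relations = [ele.copy() for ele in sg]
--     relationships = [rel.copy() for rel in sg]
--     obj_names = ob_names + ["00", "01", "02", "10", "11", "12"]
--     my_dict = {key: None for key in obj_names}
--
--     for ob in obj_names:
--        # ob_rel = []
--        if not relationships:
--            break
--        for rel in relationships:
--            if rel[2] == ob and rel[1] == 'up':
--                if my_dict[ob] is not None: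
--                    raise Error
--
--                my_dict[ob] = rel
--                relations.remove(rel)
--        relationships = [ele.copy() for ele in relations]
--     return my_dict
-- ===== SOURCE B (Python) =====
-- def obs_rel(sg, ob_names):
--     # One-pass grouping index instead of A's rescan-and-remove loops.
--     pairs = [(rel[2], rel) for rel in sg if rel[1] == 'up']
--     ups = {}
--     for key, rel in pairs:
--         ups.setdefault(key, []).append(rel)
--     result = {}
--     for ob in ob_names + ["00", "01", "02", "10", "11", "12"]:
--         group = ups.get(ob, [])
--         if len(group) > 1:
--             raise ValueError("object " + ob + " has more than one 'up' relation")
--         result[ob] = group[0] if group else None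
--     return result
-- ===== Notes on version B (the rewrite author's own statement) =====
-- stated objective: faster
-- what changed: A rescans and mutates a shrinking copy of the relation list once per object name (list.remove inside nested loops); B builds a target->relations grouping dict in one pass over sg and then reads each object's unique 'up' relation off that index in a single pass over the names.
import Mathlib
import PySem

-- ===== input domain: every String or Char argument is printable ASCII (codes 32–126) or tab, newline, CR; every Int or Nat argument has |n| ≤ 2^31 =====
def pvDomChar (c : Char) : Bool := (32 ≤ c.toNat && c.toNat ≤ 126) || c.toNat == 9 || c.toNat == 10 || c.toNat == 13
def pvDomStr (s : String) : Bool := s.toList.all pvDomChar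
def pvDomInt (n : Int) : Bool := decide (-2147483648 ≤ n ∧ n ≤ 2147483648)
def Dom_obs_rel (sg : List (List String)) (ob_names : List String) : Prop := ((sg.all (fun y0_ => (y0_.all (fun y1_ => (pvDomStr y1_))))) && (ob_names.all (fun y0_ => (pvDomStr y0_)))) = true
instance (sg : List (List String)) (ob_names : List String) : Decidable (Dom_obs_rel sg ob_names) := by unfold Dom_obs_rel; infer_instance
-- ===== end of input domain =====

-- B replaces A's per-object rescans of a shrinking relation list (with list.remove) by one
-- grouping pass over sg followed by a single readout pass over the object names (alternative
-- decomposition; return value only — neither version mutates its arguments).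

-- ===== PORT A =====
-- inner 'for rel in relationships' loop body: state = (relations, my_dict)
def pvStepA (ob : String)
    (st : List (List String) × PySem.Dict String (Option (List String)))
    (rel : List String) :
    List (List String) × PySem.Dict String (Option (List String)) :=
  if PySem.List.pyGetD rel 2 "" == ob && PySem.List.pyGetD rel 1 "" == "up" then
    if (st.2.getD ob none).isSome then
      st  -- 'raise Error' (a NameError) path; excluded by Pre_obs_rel
    else
      ((PySem.List.remove? st.1 rel).getD st.1, st.2.insert ob (some rel))
  else st

-- outer 'for ob in obj_names' loop with the 'if not relationships: break' check;
-- at the top of each iteration relationships is the fresh copy of relations, so both are carried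
def pvOuterA : List String → List (List String) → List (List String) →
    PySem.Dict String (Option (List String)) → PySem.Dict String (Option (List String))
  | [], _relations, _relationships, d => d
  | ob :: rest, relations, relationships, d =>
    if relationships.isEmpty then d
    else
      let st := relationships.foldl (pvStepA ob) (relations, d)
      pvOuterA rest st.1 st.1 st.2

def obs_rel (sg : List (List String)) (ob_names : List String) : List (String × Option (List String)) :=
  -- 'relations'/'relationships' start as (value-equal) copies of sg
  let obj_names := ob_names ++ ["00", "01", "02", "10", "11", "12"]
  let my_dict := obj_names.foldl (fun d k => d.insert k (none : Option (List String))) PySem.Dict.empty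
  (pvOuterA obj_names sg sg my_dict).items

-- ===== PORT B =====
def obs_rel_alt (sg : List (List String)) (ob_names : List String) : List (String × Option (List String)) :=
  let pairs := (sg.filter (fun rel => PySem.List.pyGetD rel 1 "" == "up")).map
    (fun rel => (PySem.List.pyGetD rel 2 "", rel))
  let ups := pairs.foldl (fun d p => d.modify p.1 ([] : List (List String)) (fun g => g ++ [p.2]))
    PySem.Dict.empty
  let obj_names := ob_names ++ ["00", "01", "02", "10", "11", "12"]
  (obj_names.foldl (fun res ob =>
      let group := ups.getD ob []
      res.insert ob (match group with
        | [] => (none : Option (List String))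
        | [r] => some r
        | r :: _ :: _ => some r)  -- 'raise ValueError' path; excluded by Pre_obs_rel
    ) PySem.Dict.empty).items

-- ===== PRECONDITION & SPEC =====
-- Pre_ excludes exactly the inputs where A raises: an IndexError on a relation shorter than 3
-- entries, and the (undefined-name) 'raise Error' when some object name has two 'up' relations.
def Pre_obs_rel (sg : List (List String)) (ob_names : List String) : Prop :=
  (∀ rel ∈ sg, 3 ≤ rel.length) ∧
  (∀ ob ∈ ob_names ++ ["00", "01", "02", "10", "11", "12"],
    (sg.filter (fun rel =>
      PySem.List.pyGetD rel 2 "" == ob && PySem.List.pyGetD rel 1 "" == "up")).length ≤ 1)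
instance (sg : List (List String)) (ob_names : List String) : Decidable (Pre_obs_rel sg ob_names) := by
  unfold Pre_obs_rel; infer_instance

def pvWitness_obs_rel : List (List String) × List String :=
  ([["a", "up", "x"], ["b", "on", "x"]], ["x", "y"])

def Spec_obs_rel (sg : List (List String)) (ob_names : List String) (out : List (String × Option (List String))) : Prop := out = obs_rel_alt sg ob_names
instance (sg : List (List String)) (ob_names : List String) (out : List (String × Option (List String))) : Decidable (Spec_obs_rel sg ob_names out) := by unfold Spec_obs_rel; infer_instance

-- ===== CLAIM (what is proved, stated in full; the proofs are below) =====
def Claim_equal_obs_rel : Prop := ∀ (sg : List (List String)) (ob_names : List String), Dom_obs_rel sg ob_names → Pre_obs_rel sg ob_names → Spec_obs_rel sg ob_names (obs_rel sg ob_names)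

-- ===== LEMMAS AND PROOFS =====

-- the match predicate of A's inner loop
def pvP (ob : String) (rel : List String) : Bool :=
  PySem.List.pyGetD rel 2 "" == ob && PySem.List.pyGetD rel 1 "" == "up"

-- the value both programs end up storing for a name: the first matching relation of sg, if any
def pvF (sg : List (List String)) (ob : String) : Option (List String) :=
  (sg.filter (pvP ob)).head?

-- the common normal form: fold inserting f k for each k
def pvMkF (f : String → Option (List String)) (l : List String)
    (d : PySem.Dict String (Option (List String))) : PySem.Dict String (Option (List String)) :=
  l.foldl (fun d k => d.insert k (f k)) d

-- keys of l that are new w.r.t. a contains-predicate, first occurrences only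
def pvNewKeys : List String → (String → Bool) → List String
  | [], _ => []
  | k :: l, c => if c k then pvNewKeys l c else k :: pvNewKeys l (fun j => j == k || c j)

theorem pvInsert_eq_self {d : PySem.Dict String (Option (List String))} {k : String}
    {v : Option (List String)} (hnd : d.keys.Nodup) (h : d.get? k = some v) :
    d.insert k v = d := by
  apply PySem.Dict.ext
  have hc : d.contains k = true := by
    rw [PySem.Dict.contains_eq_isSome_get?, h]; rfl
  rw [PySem.Dict.items_insert_of_contains _ _ hc]
  have hp : ∀ p ∈ d.items, (if p.1 == k then (k, v) else p) = p := by
    intro p hp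
    obtain ⟨a, b⟩ := p
    by_cases hk : a = k
    · subst hk
      have hg : d.get? a = some b := PySem.Dict.get?_of_mem_items d hp hnd
      rw [h] at hg
      simp [Option.some.inj hg]
    · simp [hk]
  rw [List.map_congr_left hp]
  simp

theorem pvMkF_id (f : String → Option (List String)) (l : List String)
    (d : PySem.Dict String (Option (List String))) (hnd : d.keys.Nodup)
    (h : ∀ k ∈ l, d.get? k = some (f k)) : pvMkF f l d = d := by
  induction l with
  | nil => rfl
  | cons k l ih =>
    simp only [pvMkF, List.foldl_cons]
    rw [pvInsert_eq_self hnd (h k (List.mem_cons_self))]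
    exact ih fun j hj => h j (List.mem_cons_of_mem _ hj)

theorem pvInner_noop (ob : String) (rels : List (List String))
    (st : List (List String) × PySem.Dict String (Option (List String)))
    (h : ∀ r ∈ rels, pvP ob r = false) : rels.foldl (pvStepA ob) st = st := by
  induction rels generalizing st with
  | nil => rfl
  | cons r rs ih =>
    have hr := h r List.mem_cons_self
    unfold pvP at hr
    simp only [List.foldl_cons, pvStepA, hr]
    exact ih st fun j hj => h j (List.mem_cons_of_mem _ hj)

theorem pvInner_one (ob : String) (l1 l2 : List (List String)) (r : List String)
    (d : PySem.Dict String (Option (List String)))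
    (hr : pvP ob r = true) (h1 : ∀ x ∈ l1, pvP ob x = false) (h2 : ∀ x ∈ l2, pvP ob x = false)
    (hd : d.getD ob none = none) :
    (l1 ++ r :: l2).foldl (pvStepA ob) (l1 ++ r :: l2, d) = (l1 ++ l2, d.insert ob (some r)) := by
  have hnot : r ∉ l1 := fun hmem => by simp [h1 r hmem] at hr
  rw [List.foldl_append, pvInner_noop ob l1 _ h1, List.foldl_cons]
  have hstep : pvStepA ob (l1 ++ r :: l2, d) r = (l1 ++ l2, d.insert ob (some r)) := by
    unfold pvP at hr
    have hget : (d.getD ob none).isSome = false := by rw [hd]; rfl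
    have hrm : PySem.List.remove? (l1 ++ r :: l2) r = some (l1 ++ l2) := by
      rw [PySem.List.remove?_eq_some_erase _ r (by simp), List.erase_append_right _ hnot,
        List.erase_cons_head]
    simp only [pvStepA, hr, hget, if_true, if_false, Bool.false_eq_true, hrm]
    rfl
  rw [hstep, pvInner_noop ob l2 _ h2]

theorem pvOuter_char (f : String → Option (List String)) :
    ∀ (rest : List String) (relations : List (List String))
      (d : PySem.Dict String (Option (List String))),
      d.keys.Nodup →
      (∀ ob ∈ rest, (relations.filter (pvP ob)).length ≤ 1) →
      (∀ ob ∈ rest,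
        (d.get? ob = some none ∧ (relations.filter (pvP ob)).head? = f ob) ∨
        (d.get? ob = some (f ob) ∧ relations.filter (pvP ob) = [])) →
      pvOuterA rest relations relations d = pvMkF f rest d := by
  intro rest
  induction rest with
  | nil => intro relations d _ _ _; rfl
  | cons ob rest ih =>
    intro relations d hnd hcnt hinv
    simp only [pvOuterA]
    by_cases hrel : relations.isEmpty
    · rw [if_pos hrel]
      refine (pvMkF_id f _ d hnd ?_).symm
      intro k hk
      have hempty : relations = [] := List.isEmpty_iff.1 hrel
      rcases hinv k hk with ⟨hg, hh⟩ | ⟨hg, _⟩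
      · rw [hempty] at hh; simp at hh; rw [hg, hh]
      · exact hg
    · rw [if_neg hrel]
      rcases hfe : relations.filter (pvP ob) with _ | ⟨r, rs⟩
      · -- no match for ob: inner loop is a no-op
        have hall : ∀ x ∈ relations, pvP ob x = false := by
          intro x hx
          by_contra hc
          have : x ∈ relations.filter (pvP ob) := List.mem_filter.2 ⟨hx, by simpa using hc⟩
          simp [hfe] at this
        rw [pvInner_noop ob relations (relations, d) hall]
        have hdins : d.insert ob (f ob) = d := by
          rcases hinv ob List.mem_cons_self with ⟨hg, hh⟩ | ⟨hg, _⟩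
          · rw [hfe] at hh; simp at hh
            exact pvInsert_eq_self hnd (by rw [hg, hh])
          · exact pvInsert_eq_self hnd hg
        have := ih relations d hnd
          (fun o ho => hcnt o (List.mem_cons_of_mem _ ho))
          (fun o ho => hinv o (List.mem_cons_of_mem _ ho))
        simp only [pvMkF, List.foldl_cons]
        rw [hdins]
        exact this
      · -- exactly one match r (count ≤ 1)
        have hrs : rs = [] := by
          have := hcnt ob List.mem_cons_self
          rw [hfe] at this; simp at this; omega
        subst hrs
        obtain ⟨l1, l2, hsplit, h1w, hpr, hl2⟩ := List.filter_eq_cons_iff.1 hfe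
        have h1 : ∀ x ∈ l1, pvP ob x = false := fun x hx => by simpa using h1w x hx
        have h2 : ∀ x ∈ l2, pvP ob x = false := by
          intro x hx
          by_contra hc
          have : x ∈ l2.filter (pvP ob) := List.mem_filter.2 ⟨hx, by simpa using hc⟩
          simp [hl2] at this
        rcases hinv ob List.mem_cons_self with ⟨hg, hh⟩ | ⟨_, hh⟩
        swap
        · rw [hfe] at hh; simp at hh
        have hfob : f ob = some r := by rw [hfe] at hh; simpa using hh.symm
        have hd : d.getD ob none = none := by
          rw [PySem.Dict.getD_eq_get?_getD, hg]; rfl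
        rw [hsplit, pvInner_one ob l1 l2 r d hpr h1 h2 hd]
        have hnd' : (d.insert ob (some r)).keys.Nodup := PySem.Dict.nodup_keys_insert _ _ _ hnd
        have hsub : (l1 ++ l2).Sublist (l1 ++ r :: l2) :=
          (List.sublist_cons_self r l2).append_left l1
        have hcnt' : ∀ o ∈ rest, ((l1 ++ l2).filter (pvP o)).length ≤ 1 := by
          intro o ho
          calc ((l1 ++ l2).filter (pvP o)).length
              ≤ ((l1 ++ r :: l2).filter (pvP o)).length := (hsub.filter _).length_le
            _ ≤ 1 := by rw [← hsplit]; exact hcnt o (List.mem_cons_of_mem _ ho)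
        have hinv' : ∀ o ∈ rest,
            ((d.insert ob (some r)).get? o = some none ∧
              (((l1 ++ l2).filter (pvP o)).head? = f o)) ∨
            ((d.insert ob (some r)).get? o = some (f o) ∧ (l1 ++ l2).filter (pvP o) = []) := by
          intro o ho
          by_cases hoo : o = ob
          · subst hoo
            right
            constructor
            · rw [PySem.Dict.get?_insert_self, hfob]
            · rw [List.filter_append, List.filter_eq_nil_iff.2 (by simpa using h1),
                List.filter_eq_nil_iff.2 (by simpa using h2)]
              rfl
          · have hget : (d.insert ob (some r)).get? o = d.get? o :=
              PySem.Dict.get?_insert_of_ne _ _ hoo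
            have hro : pvP o r = false := by
              unfold pvP at hpr ⊢
              simp only [Bool.and_eq_true, beq_iff_eq] at hpr
              simp [hpr.1, Ne.symm hoo]
            have hfilt : (l1 ++ l2).filter (pvP o) = relations.filter (pvP o) := by
              rw [hsplit, List.filter_append, List.filter_append, List.filter_cons, hro]
              simp
            rcases hinv o (List.mem_cons_of_mem _ ho) with ⟨hgo, hho⟩ | ⟨hgo, hho⟩
            · exact Or.inl ⟨by rw [hget, hgo], by rw [hfilt, hho]⟩
            · exact Or.inr ⟨by rw [hget, hgo], by rw [hfilt, hho]⟩
        have := ih (l1 ++ l2) (d.insert ob (some r)) hnd' hcnt' hinv'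
        simp only [pvMkF, List.foldl_cons] at this ⊢
        rw [hfob]
        exact this

theorem pvGet?_initNone (l : List String) (d : PySem.Dict String (Option (List String))) (k : String) :
    (l.foldl (fun d k => d.insert k (none : Option (List String))) d).get? k =
      if k ∈ l then some none else d.get? k := by
  induction l generalizing d with
  | nil => simp
  | cons k0 l ih =>
    simp only [List.foldl_cons]
    rw [ih, PySem.Dict.get?_insert]
    by_cases h2 : k = k0 <;> by_cases h1 : k ∈ l <;> simp [h1, h2]

theorem pvContains_mkF (f : String → Option (List String)) (l : List String)
    (d : PySem.Dict String (Option (List String))) (k : String) :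
    (pvMkF f l d).contains k = (d.contains k || decide (k ∈ l)) := by
  induction l generalizing d with
  | nil => simp [pvMkF]
  | cons k0 l ih =>
    simp only [pvMkF, List.foldl_cons] at ih ⊢
    rw [ih, PySem.Dict.contains_insert]
    by_cases h1 : k = k0 <;> by_cases h2 : k ∈ l <;> simp [h1, h2]

theorem pvNewKeys_subset {l : List String} {c : String → Bool} {k : String}
    (h : k ∈ pvNewKeys l c) : k ∈ l := by
  induction l generalizing c with
  | nil => simp [pvNewKeys] at h
  | cons k0 l ih =>
    simp only [pvNewKeys] at h
    split at h
    · exact List.mem_cons_of_mem _ (ih h)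
    · rcases List.mem_cons.1 h with h' | h'
      · subst h'; exact List.mem_cons_self
      · exact List.mem_cons_of_mem _ (ih h')

theorem pvNewKeys_nil (l : List String) (c : String → Bool) (h : ∀ k ∈ l, c k = true) :
    pvNewKeys l c = [] := by
  induction l generalizing c with
  | nil => rfl
  | cons k0 l ih =>
    simp only [pvNewKeys, h k0 List.mem_cons_self, if_true]
    exact ih c fun j hj => h j (List.mem_cons_of_mem _ hj)

theorem pvItems_mkF (f : String → Option (List String)) :
    ∀ (l : List String) (d : PySem.Dict String (Option (List String))),
      (pvMkF f l d).items =
        d.items.map (fun p => if p.1 ∈ l then (p.1, f p.1) else p) ++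
        (pvNewKeys l d.contains).map (fun j => (j, f j)) := by
  intro l
  induction l with
  | nil => intro d; simp [pvMkF, pvNewKeys]
  | cons k0 l ih =>
    intro d
    simp only [pvMkF, List.foldl_cons] at ih ⊢
    rw [ih (d.insert k0 (f k0))]
    have hcfun : (d.insert k0 (f k0)).contains = fun j => (j == k0 || d.contains j) :=
      funext fun j => PySem.Dict.contains_insert _ _ _ _
    by_cases hb : d.contains k0 = true
    · rw [PySem.Dict.items_insert_of_contains _ _ hb, hcfun]
      have hceq : (fun j => (j == k0 || d.contains j)) = d.contains := funext fun j => by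
        by_cases hj : j = k0 <;> simp [hj, hb]
      rw [hceq]
      have hnk : pvNewKeys (k0 :: l) d.contains = pvNewKeys l d.contains := by
        simp only [pvNewKeys, hb, if_true]
      rw [hnk, List.map_map]
      congr 1
      apply List.map_congr_left
      intro p _
      by_cases hpk : p.1 = k0
      · simp [Function.comp, hpk, List.mem_cons]
      · simp [Function.comp, hpk, List.mem_cons]
    · have hb' : d.contains k0 = false := by simpa using hb
      rw [PySem.Dict.items_insert_of_not_contains _ _ hb', hcfun]
      have hnk : pvNewKeys (k0 :: l) d.contains =
          k0 :: pvNewKeys l (fun j => (j == k0 || d.contains j)) := by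
        simp only [pvNewKeys, hb', if_false, Bool.false_eq_true]
      rw [hnk, List.map_append]
      have hmap : d.items.map (fun p => if p.1 ∈ l then (p.1, f p.1) else p) =
          d.items.map (fun p => if p.1 ∈ k0 :: l then (p.1, f p.1) else p) := by
        apply List.map_congr_left
        intro p hp
        have hkey : p.1 ∈ d.keys := PySem.Dict.mem_keys_of_mem_items _ hp
        have hne : p.1 ≠ k0 := by
          intro he
          rw [he] at hkey
          rw [← PySem.Dict.contains_iff_mem_keys] at hkey
          simp [hb'] at hkey
        simp [List.mem_cons, hne]
      rw [hmap]
      simp [List.append_assoc]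

theorem pvA_char (sg : List (List String)) (ob_names : List String)
    (hpre : Pre_obs_rel sg ob_names) :
    obs_rel sg ob_names =
      (pvMkF (pvF sg) (ob_names ++ ["00", "01", "02", "10", "11", "12"])
        ((ob_names ++ ["00", "01", "02", "10", "11", "12"]).foldl
          (fun d k => d.insert k (none : Option (List String))) PySem.Dict.empty)).items := by
  show (pvOuterA (ob_names ++ ["00", "01", "02", "10", "11", "12"]) sg sg
      ((ob_names ++ ["00", "01", "02", "10", "11", "12"]).foldl
        (fun d k => d.insert k (none : Option (List String))) PySem.Dict.empty)).items = _
  congr 1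
  apply pvOuter_char
  · exact PySem.Dict.nodup_keys_foldl_insert _ _ _ PySem.Dict.nodup_keys_empty
  · exact fun ob hob => hpre.2 ob hob
  · intro ob hob
    left
    refine ⟨?_, rfl⟩
    rw [pvGet?_initNone]
    simp [hob]

theorem pvFoldlInsert_congr (g1 g2 : String → Option (List String)) (h : ∀ ob, g1 ob = g2 ob) :
    ∀ (l : List String) (d : PySem.Dict String (Option (List String))),
      l.foldl (fun res ob => res.insert ob (g1 ob)) d = l.foldl (fun d k => d.insert k (g2 k)) d := by
  intro l
  induction l with
  | nil => intro d; rfl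
  | cons k0 l ih => intro d; simp only [List.foldl_cons, h k0]; exact ih _

theorem pvB_char (sg : List (List String)) (ob_names : List String) :
    obs_rel_alt sg ob_names =
      (pvMkF (pvF sg) (ob_names ++ ["00", "01", "02", "10", "11", "12"]) PySem.Dict.empty).items := by
  have hgroup : ∀ ob : String,
      (((sg.filter (fun rel => PySem.List.pyGetD rel 1 "" == "up")).map
          (fun rel => (PySem.List.pyGetD rel 2 "", rel))).foldl
        (fun d p => d.modify p.1 ([] : List (List String)) (fun g => g ++ [p.2]))
        PySem.Dict.empty).getD ob [] = sg.filter (pvP ob) := by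
    intro ob
    rw [PySem.Dict.getD_foldl_modify_append, PySem.Dict.getD_empty, List.filter_map,
      List.map_map, List.filter_filter]
    unfold pvP
    simp [Function.comp_def]
  have hval : ∀ ob : String,
      (match (((sg.filter (fun rel => PySem.List.pyGetD rel 1 "" == "up")).map
          (fun rel => (PySem.List.pyGetD rel 2 "", rel))).foldl
        (fun d p => d.modify p.1 ([] : List (List String)) (fun g => g ++ [p.2]))
        PySem.Dict.empty).getD ob [] with
        | [] => (none : Option (List String))
        | [r] => some r
        | r :: _ :: _ => some r) = pvF sg ob := by
    intro ob
    rw [hgroup ob]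
    unfold pvF
    cases sg.filter (pvP ob) with
    | nil => rfl
    | cons r t => cases t <;> rfl
  exact congrArg PySem.Dict.items (pvFoldlInsert_congr _ _ hval _ _)

-- ===== VERDICT (by name: the statement is the Claim_ definition above) =====
theorem obs_rel_spec : Claim_equal_obs_rel := by
  intro sg ob_names _hdom hpre
  unfold Spec_obs_rel
  rw [pvA_char sg ob_names hpre, pvB_char sg ob_names]
  have hd0 : ((ob_names ++ ["00", "01", "02", "10", "11", "12"]).foldl
      (fun d k => d.insert k (none : Option (List String))) PySem.Dict.empty) =
      pvMkF (fun _ => none) (ob_names ++ ["00", "01", "02", "10", "11", "12"]) PySem.Dict.empty := rfl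
  rw [hd0, pvItems_mkF, pvItems_mkF, pvItems_mkF]
  have hcont0 : ∀ k ∈ ob_names ++ ["00", "01", "02", "10", "11", "12"],
      (pvMkF (fun _ => none) (ob_names ++ ["00", "01", "02", "10", "11", "12"])
        (PySem.Dict.empty : PySem.Dict String (Option (List String)))).contains k = true := by
    intro k hk
    rw [pvContains_mkF]
    simp [hk]
  rw [pvNewKeys_nil _ _ hcont0]
  have hie : (PySem.Dict.empty : PySem.Dict String (Option (List String))).items = [] := rfl
  simp only [hie, List.map_nil, List.nil_append, List.map_map, List.append_nil]
  apply List.map_congr_left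
  intro j hj
  have : j ∈ ob_names ++ ["00", "01", "02", "10", "11", "12"] := pvNewKeys_subset hj
  simp [Function.comp, this]
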